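-- pv_equiv track=rewrite | github.com/ctrlaltwilso/python-challenges | navigate-arrays-challenges/evaluate_path.py | evaluate_path
-- ===== SOURCE A (Python) =====
-- def evaluate_path(numbers):
--     position = 0
--     moves = 0
--     direction = 1
--     direction_change = 0
--
--     while True:
--         if numbers[position] == 0:
--             return (position, moves)
--
--         step = numbers[position] * direction
--         new_position = position + step
--         if new_position < 0 or new_position >= len(numbers):
--             direction *= -1
--             direction_change += 1
--             if direction_change >= 2:
--                 return (position, moves)
--         else:
--             position = new_position
--             moves += 1
-- ===== SOURCE B (Python) =====
-- def _succ(numbers, direction):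
--     n = len(numbers)
--     return [i + v * direction if v != 0 and 0 <= i + v * direction < n else None
--             for i, v in enumerate(numbers)]
--
--
-- def _follow(succ, start):
--     pos, steps, seen = start, 0, set()
--     while succ[pos] is not None and pos not in seen:
--         seen.add(pos)
--         pos = succ[pos]
--         steps += 1
--     return pos, steps
--
--
-- def evaluate_path(numbers):
--     fwd = _succ(numbers, 1)
--     bwd = _succ(numbers, -1)
--     pos, m1 = _follow(fwd, 0)
--     if numbers[pos] == 0:
--         return (pos, m1)
--     pos, m2 = _follow(bwd, pos)
--     return (pos, m1 + m2)
-- ===== Notes on version B (the rewrite author's own statement) =====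
-- stated objective: alternative
-- what changed: B first materialises the walk as two successor arrays (the functional graph of one step in each direction, with None for a zero cell or an out-of-bounds step) and then runs a generic pointer-chasing routine with a visited set over each graph in turn, instead of A's step-by-step simulation with direction and bounce-counter state; the visited set also makes B terminate on cyclic inputs where A loops forever (outside Pre_).
import Mathlib
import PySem

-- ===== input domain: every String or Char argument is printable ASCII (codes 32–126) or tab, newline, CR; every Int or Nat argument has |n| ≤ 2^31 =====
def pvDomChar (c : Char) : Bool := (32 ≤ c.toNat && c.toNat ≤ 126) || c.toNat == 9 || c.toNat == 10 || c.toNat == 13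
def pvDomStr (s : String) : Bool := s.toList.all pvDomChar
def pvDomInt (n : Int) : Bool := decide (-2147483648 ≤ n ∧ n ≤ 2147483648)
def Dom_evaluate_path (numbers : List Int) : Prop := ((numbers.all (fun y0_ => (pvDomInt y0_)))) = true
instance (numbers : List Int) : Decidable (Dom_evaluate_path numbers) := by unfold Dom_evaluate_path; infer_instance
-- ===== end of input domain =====

-- B replaces A's step-by-step simulation (direction and bounce-counter state) by building the
-- functional graph of one step per direction (two successor arrays) and chasing pointers
-- through each graph with a visited set; objective: an alternative algorithm of the same cost.
-- A can run forever on cyclic inputs (B's visited set stops there); A's port is fueled with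
-- 2*len+3, which exceeds the length of every terminating run, so the fuel-out value none is
-- reached only outside Pre_.

-- ===== PORT A =====
-- literal transliteration of A's while-True loop; state (position, moves, direction, direction_change)
def evalA (numbers : List Int) (position moves direction direction_change : Int) : Nat → Option (Int × Int)
  | 0 => none
  | fuel + 1 =>
    match PySem.List.pyGet? numbers position with
    | none => none   -- IndexError (only the empty list reaches this; outside Pre_)
    | some v =>
      if v == 0 then some (position, moves)
      else
        let step := v * direction
        let new_position := position + step
        if new_position < 0 ∨ new_position ≥ (numbers.length : Int) then
          let direction' := direction * (-1)
          let direction_change' := direction_change + 1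
          if direction_change' ≥ 2 then some (position, moves)
          else evalA numbers position moves direction' direction_change' fuel
        else evalA numbers new_position (moves + 1) direction direction_change fuel

def evaluate_path (numbers : List Int) : Int × Int :=
  (evalA numbers 0 0 1 0 (2 * numbers.length + 3)).getD (0, 0)

-- ===== PORT B =====
-- Source B's _succ: the one-step successor array for one direction (None = zero cell or out of bounds)
def pvSucc (numbers : List Int) (direction : Int) : List (Option Int) :=
  (PySem.List.enumerate numbers 0).map (fun iv =>
    if iv.2 ≠ 0 ∧ 0 ≤ iv.1 + iv.2 * direction ∧ iv.1 + iv.2 * direction < (numbers.length : Int)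
    then some (iv.1 + iv.2 * direction) else none)

-- Source B's _follow: pointer chasing with a visited set; the while loop as fuel recursion
-- (fuel 2*len+3 always exceeds the iteration count: each iteration adds a fresh index to seen)
def pvFollow (succ : List (Option Int)) (pos steps : Int) (seen : PySem.Set Int) : Nat → Option (Int × Int)
  | 0 => none
  | fuel + 1 =>
    match PySem.List.pyGet? succ pos with
    | none => none   -- IndexError (only the empty list; outside Pre_)
    | some o =>
      match o with
      | none => some (pos, steps)
      | some nxt =>
        if PySem.Set.contains seen pos then some (pos, steps)
        else pvFollow succ nxt (steps + 1) (PySem.Set.add seen pos) fuel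

def evaluate_path_alt (numbers : List Int) : Int × Int :=
  let fwd := pvSucc numbers 1
  let bwd := pvSucc numbers (-1)
  match pvFollow fwd 0 0 PySem.Set.empty (2 * numbers.length + 3) with
  | none => (0, 0)
  | some (pos, m1) =>
    match PySem.List.pyGet? numbers pos with
    | none => (0, 0)
    | some v =>
      if v == 0 then (pos, m1)
      else
        match pvFollow bwd pos 0 PySem.Set.empty (2 * numbers.length + 3) with
        | none => (0, 0)
        | some (pos2, m2) => (pos2, m1 + m2)

-- ===== PRECONDITION & SPEC =====
-- pvWalk follows the same state graph (position, direction, bounced-once flag) and reports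
-- whether A's walk terminates within the pigeonhole bound; termination of this walk is not
-- expressible without following it.
def pvWalk (numbers : List Int) (position direction : Int) (second : Bool) : Nat → Bool
  | 0 => false
  | fuel + 1 =>
    match PySem.List.pyGet? numbers position with
    | none => false
    | some v =>
      if v == 0 then true
      else
        let new_position := position + v * direction
        if new_position < 0 ∨ new_position ≥ (numbers.length : Int) then
          if second then true else pvWalk numbers position (-direction) true fuel
        else pvWalk numbers new_position direction second fuel

-- Pre_ excludes the empty list (A raises IndexError at numbers[0]) and the inputs on which
-- the bouncing walk never terminates (A loops forever there).
def Pre_evaluate_path (numbers : List Int) : Prop :=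
  numbers ≠ [] ∧ pvWalk numbers 0 1 false (2 * numbers.length + 3) = true
instance (numbers : List Int) : Decidable (Pre_evaluate_path numbers) := by
  unfold Pre_evaluate_path; infer_instance

def pvWitness_evaluate_path : List Int := [1, 2, 0]

def Spec_evaluate_path (numbers : List Int) (out : Int × Int) : Prop := out = evaluate_path_alt numbers
instance (numbers : List Int) (out : Int × Int) : Decidable (Spec_evaluate_path numbers out) := by
  unfold Spec_evaluate_path; infer_instance

-- ===== CLAIM (what is proved, stated in full; the proofs are below) =====
def Claim_equal_evaluate_path : Prop := ∀ (numbers : List Int), Dom_evaluate_path numbers → Pre_evaluate_path numbers → Spec_evaluate_path numbers (evaluate_path numbers)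

-- ===== LEMMAS AND PROOFS =====

-- proof-side helper: one phase of the walk as plain simulation (no visited set); result flag
-- true = stopped on a zero cell, false = stopped on an out-of-bounds step (bounce)
def phaseB (numbers : List Int) (direction position moves : Int) : Nat → Option (Bool × Int × Int)
  | 0 => none
  | fuel + 1 =>
    match PySem.List.pyGet? numbers position with
    | none => none
    | some v =>
      if v == 0 then some (true, position, moves)
      else
        let new_position := position + v * direction
        if new_position < 0 ∨ new_position ≥ (numbers.length : Int) then some (false, position, moves)
        else phaseB numbers direction new_position (moves + 1) fuel

-- the A-loop terminates (returns some) exactly when pvWalk says so, fuel for fuel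
theorem evalA_isSome (numbers : List Int) :
    ∀ (f : Nat) (position direction moves : Int) (second : Bool),
      (evalA numbers position moves direction (cond second 1 0) f).isSome
        = pvWalk numbers position direction second f := by
  intro f
  induction f with
  | zero => intro p d m s; simp [evalA, pvWalk]
  | succ f ih =>
    intro p d m s
    simp only [evalA, pvWalk]
    cases h : PySem.List.pyGet? numbers p with
    | none => simp
    | some v =>
      simp only
      by_cases hv : v == 0
      · simp [hv]
      · simp only [hv, if_neg, Bool.false_eq_true, not_false_iff]
        by_cases hb : p + v * d < 0 ∨ p + v * d ≥ (numbers.length : Int)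
        · cases s with
          | false =>
            simpa [hb, cond] using ih p (-d) m true
          | true => simp [hb, cond]
        · cases s with
          | false => simpa [hb] using ih (p + v * d) d (m + 1) false
          | true => simpa [hb] using ih (p + v * d) d (m + 1) true

-- in the second phase (direction_change = 1) A's loop is exactly one plain phase, fuel for fuel
theorem evalA_phase1 (numbers : List Int) :
    ∀ (f : Nat) (position moves direction : Int),
      evalA numbers position moves direction 1 f
        = Option.map (fun t => (t.2.1, t.2.2)) (phaseB numbers direction position moves f) := by
  intro f
  induction f with
  | zero => intro p m d; simp [evalA, phaseB]
  | succ f ih =>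
    intro p m d
    simp only [evalA, phaseB]
    cases h : PySem.List.pyGet? numbers p with
    | none => simp
    | some v =>
      simp only
      by_cases hv : v == 0
      · simp [hv]
      · by_cases hb : p + v * d < 0 ∨ p + v * d ≥ (numbers.length : Int)
        · simp [hv, hb]
        · simpa [hv, hb] using ih (p + v * d) (m + 1) d

-- phaseB is monotone in fuel once it returns
theorem phaseB_mono (numbers : List Int) (direction : Int) :
    ∀ (f f' : Nat) (position moves : Int) (r : Bool × Int × Int),
      phaseB numbers direction position moves f = some r → f ≤ f' →
      phaseB numbers direction position moves f' = some r := by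
  intro f
  induction f with
  | zero => intro f' p m r h; simp [phaseB] at h
  | succ f ih =>
    intro f' p m r h hle
    obtain ⟨f'', rfl⟩ : ∃ f'', f' = f'' + 1 := ⟨f' - 1, by omega⟩
    simp only [phaseB] at h ⊢
    cases hg : PySem.List.pyGet? numbers p with
    | none => rw [hg] at h; simp at h
    | some v =>
      rw [hg] at h
      by_cases hv : v == 0
      · simpa [hv] using by simpa [hv] using h
      · by_cases hb : p + v * direction < 0 ∨ p + v * direction ≥ (numbers.length : Int)
        · simpa [hv, hb] using by simpa [hv, hb] using h
        · simp only [hv, hb] at h ⊢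
          exact ih f'' (p + v * direction) (m + 1) r (by simpa [hv, hb] using h) (by omega)

-- first phase (direction_change = 0): A's loop either finishes inside the first plain phase,
-- or that phase breaks and A continues as phase 1 with strictly smaller fuel
theorem evalA_phase0 (numbers : List Int) (direction : Int) :
    ∀ (f : Nat) (position moves : Int) (r : Int × Int),
      evalA numbers position moves direction 0 f = some r →
      (∃ p m, phaseB numbers direction position moves f = some (true, p, m) ∧ r = (p, m)) ∨
      (∃ p m f', f' < f ∧ phaseB numbers direction position moves f = some (false, p, m) ∧
        evalA numbers p m (-direction) 1 f' = some r) := by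
  intro f
  induction f with
  | zero => intro p m r h; simp [evalA] at h
  | succ f ih =>
    intro p m r h
    simp only [evalA] at h
    cases hg : PySem.List.pyGet? numbers p with
    | none => rw [hg] at h; exact absurd h (by simp)
    | some v =>
      rw [hg] at h
      by_cases hv : v == 0
      · left
        refine ⟨p, m, ?_, ?_⟩
        · simp [phaseB, hg, hv]
        · simpa [hv] using h.symm
      · by_cases hb : p + v * direction < 0 ∨ p + v * direction ≥ (numbers.length : Int)
        · right
          refine ⟨p, m, f, by omega, by simp [phaseB, hg, hv, hb], ?_⟩
          have : direction * (-1) = -direction := by ring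
          simpa [hv, hb, this] using h
        · have h' : evalA numbers (p + v * direction) (m + 1) direction 0 f = some r := by
            simpa [hv, hb] using h
          rcases ih (p + v * direction) (m + 1) r h' with ⟨p', m', hp, hr⟩ | ⟨p', m', f', hf, hp, he⟩
          · left; exact ⟨p', m', by simp [phaseB, hg, hv, hb, hp], hr⟩
          · right; exact ⟨p', m', f', by omega, by simp [phaseB, hg, hv, hb, hp], he⟩

-- whether phaseB returns does not depend on the moves accumulator
theorem phaseB_isSome_congr (numbers : List Int) (direction : Int) :
    ∀ (f : Nat) (position moves moves' : Int),
      (phaseB numbers direction position moves f).isSome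
        = (phaseB numbers direction position moves' f).isSome := by
  intro f
  induction f with
  | zero => intro p m m'; simp [phaseB]
  | succ f ih =>
    intro p m m'
    simp only [phaseB]
    cases hg : PySem.List.pyGet? numbers p with
    | none => simp
    | some v =>
      by_cases hv : v == 0
      · simp [hv]
      · by_cases hb : p + v * direction < 0 ∨ p + v * direction ≥ (numbers.length : Int)
        · simp [hv, hb]
        · simpa [hv, hb] using ih (p + v * direction) (m + 1) (m' + 1)

-- isSome is monotone in fuel
theorem phaseB_isSome_mono (numbers : List Int) (direction : Int) (f f' : Nat)
    (position moves : Int) (h : (phaseB numbers direction position moves f).isSome = true)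
    (hle : f ≤ f') : (phaseB numbers direction position moves f').isSome = true := by
  obtain ⟨r, hr⟩ := Option.isSome_iff_exists.mp h
  rw [phaseB_mono numbers direction f f' position moves r hr hle]
  rfl

-- a position whose termination fuel strictly descends forever does not terminate
theorem phaseB_no_descent (numbers : List Int) (direction : Int) (p : Int)
    (hdesc : ∀ g : Nat, (phaseB numbers direction p 0 (g + 1)).isSome = true →
      (phaseB numbers direction p 0 g).isSome = true) :
    ∀ g : Nat, (phaseB numbers direction p 0 g).isSome = false := by
  intro g
  induction g with
  | zero => simp [phaseB]
  | succ g ih =>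
    by_contra hc
    have h1 : (phaseB numbers direction p 0 (g + 1)).isSome = true := by
      cases h : (phaseB numbers direction p 0 (g + 1)).isSome
      · exact absurd h hc
      · rfl
    rw [hdesc g h1] at ih
    exact absurd ih (by simp)

-- successor-array lookup at an in-range nonnegative index
theorem pyGet?_pvSucc (numbers : List Int) (direction p v : Int) (hp : 0 ≤ p)
    (hv : PySem.List.pyGet? numbers p = some v) :
    PySem.List.pyGet? (pvSucc numbers direction) p =
      some (if v ≠ 0 ∧ 0 ≤ p + v * direction ∧ p + v * direction < (numbers.length : Int)
            then some (p + v * direction) else none) := by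
  rw [PySem.List.pyGet?_of_nonneg numbers hp] at hv
  have hsucc : PySem.List.pyGet? (pvSucc numbers direction) p
      = (pvSucc numbers direction)[p.toNat]? := PySem.List.pyGet?_of_nonneg _ hp
  rw [hsucc]
  unfold pvSucc
  rw [List.getElem?_map, PySem.List.getElem?_enumerate, hv]
  simp only [Option.map_some]
  congr 1
  simp [Int.toNat_of_nonneg hp]

-- the plain phase ends at a nonnegative position carrying the cell value that matches its flag
theorem phaseB_out (numbers : List Int) (direction : Int) :
    ∀ (f : Nat) (position moves : Int) (b : Bool) (p m : Int),
      phaseB numbers direction position moves f = some (b, p, m) → 0 ≤ position →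
      0 ≤ p ∧ ∃ v, PySem.List.pyGet? numbers p = some v ∧ (if b then v = 0 else v ≠ 0) := by
  intro f
  induction f with
  | zero => intro p0 m0 b p m h; simp [phaseB] at h
  | succ f ih =>
    intro p0 m0 b p m h hp0
    simp only [phaseB] at h
    cases hg : PySem.List.pyGet? numbers p0 with
    | none => rw [hg] at h; exact absurd h (by simp)
    | some v =>
      rw [hg] at h
      by_cases hv : v == 0
      · have h' : true = b ∧ p0 = p ∧ m0 = m := by simpa [hv] using h
        obtain ⟨hbb, hpp, hmm⟩ := h'
        subst hbb; subst hpp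
        exact ⟨hp0, v, hg, by simpa using (beq_iff_eq.mp hv)⟩
      · by_cases hb : p0 + v * direction < 0 ∨ p0 + v * direction ≥ (numbers.length : Int)
        · have h' : false = b ∧ p0 = p ∧ m0 = m := by simpa [hv, hb] using h
          obtain ⟨hbb, hpp, hmm⟩ := h'
          subst hbb; subst hpp
          refine ⟨hp0, v, hg, ?_⟩
          simpa using fun hc => hv (beq_iff_eq.mpr hc)
        · have h' : phaseB numbers direction (p0 + v * direction) (m0 + 1) f = some (b, p, m) := by
            simpa [hv, hb] using h
          push_neg at hb
          exact ih (p0 + v * direction) (m0 + 1) b p m h' hb.1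

-- the pointer chase over pvSucc reproduces a terminating plain phase:
-- invariant on seen = every visited index terminates strictly slower than the current one
theorem follow_eq_phase (numbers : List Int) (direction : Int) :
    ∀ (f : Nat) (p m s : Int) (seen : PySem.Set Int) (r : Bool × Int × Int),
      0 ≤ p →
      phaseB numbers direction p m f = some r →
      (∀ q, PySem.Set.contains seen q = true → ∀ g : Nat,
        (phaseB numbers direction q 0 (g + 1)).isSome = true →
        (phaseB numbers direction p 0 g).isSome = true) →
      pvFollow (pvSucc numbers direction) p s seen f = some (r.2.1, s + (r.2.2 - m)) := by
  intro f
  induction f with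
  | zero => intro p m s seen r hp h hinv; simp [phaseB] at h
  | succ f ih =>
    intro p m s seen r hp h hinv
    simp only [phaseB] at h
    cases hg : PySem.List.pyGet? numbers p with
    | none => rw [hg] at h; exact absurd h (by simp)
    | some v =>
      rw [hg] at h
      have hlook := pyGet?_pvSucc numbers direction p v hp hg
      by_cases hv : v == 0
      · have h' : r = (true, p, m) := by simpa [hv] using h.symm
        subst h'
        have hv0 : v = 0 := beq_iff_eq.mp hv
        rw [if_neg (by simp [hv0])] at hlook
        simp only [pvFollow, hlook]
        simp
      · have hvne : v ≠ 0 := fun hc => hv (beq_iff_eq.mpr hc)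
        by_cases hb : p + v * direction < 0 ∨ p + v * direction ≥ (numbers.length : Int)
        · have h' : r = (false, p, m) := by simpa [hv, hb] using h.symm
          subst h'
          rw [if_neg (by push_neg; intro _ h1; rcases hb with hb | hb <;> omega)] at hlook
          simp only [pvFollow, hlook]
          simp
        · have h : phaseB numbers direction (p + v * direction) (m + 1) f = some r := by
            simpa [hv, hb] using h
          push_neg at hb
          rw [if_pos ⟨hvne, hb.1, by omega⟩] at hlook
          simp only [pvFollow, hlook]
          -- the seen-check cannot fire: p terminates, but membership would force infinite descent
          have hnotseen : PySem.Set.contains seen p = false := by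
            by_contra hc
            have hcp : PySem.Set.contains seen p = true := by
              cases hcc : PySem.Set.contains seen p
              · exact absurd hcc hc
              · rfl
            have hdesc := hinv p hcp
            have hnone := phaseB_no_descent numbers direction p hdesc (f + 1)
            have hsomef : (phaseB numbers direction p m (f + 1)).isSome = true := by
              have : phaseB numbers direction p m (f + 1)
                  = phaseB numbers direction (p + v * direction) (m + 1) f := by
                simp [phaseB, hg, hv]; omega
              rw [this, h]; rfl
            rw [phaseB_isSome_congr numbers direction (f + 1) p m 0] at hsomef
            rw [hnone] at hsomef
            exact absurd hsomef (by simp)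
          rw [hnotseen]
          simp only [Bool.false_eq_true, if_neg, ite_false]
          have hstep0 : ∀ (g : Nat) (m' : Int), phaseB numbers direction p m' (g + 1)
              = phaseB numbers direction (p + v * direction) (m' + 1) g := by
            intro g m'
            simp [phaseB, hg, hv]; omega
          have hinv' : ∀ q, PySem.Set.contains (PySem.Set.add seen p) q = true → ∀ g : Nat,
              (phaseB numbers direction q 0 (g + 1)).isSome = true →
              (phaseB numbers direction (p + v * direction) 0 g).isSome = true := by
            intro q hq g hqsome
            have hqmem : q ∈ PySem.Set.add seen p := (PySem.Set.contains_iff _ _).mp hq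
            rcases (PySem.Set.mem_add seen p q).mp hqmem with hqs | rfl
            · have hqc : PySem.Set.contains seen q = true := (PySem.Set.contains_iff _ _).mpr hqs
              have hpg : (phaseB numbers direction p 0 g).isSome = true := hinv q hqc g hqsome
              cases g with
              | zero => simp [phaseB] at hpg
              | succ g0 =>
                rw [hstep0 g0 0] at hpg
                rw [phaseB_isSome_congr numbers direction g0 _ (0 + 1) 0] at hpg
                exact phaseB_isSome_mono numbers direction g0 (g0 + 1) _ 0 hpg (by omega)
            · rw [hstep0 g 0] at hqsome
              rw [phaseB_isSome_congr numbers direction g _ (0 + 1) 0] at hqsome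
              exact hqsome
          have hrec := ih (p + v * direction) (m + 1) (s + 1) (PySem.Set.add seen p) r
            (by omega) h hinv'
          rw [hrec]
          congr 1
          ring_nf

-- the visited set starts empty, so its invariant holds vacuously
theorem empty_inv (numbers : List Int) (direction p0 : Int) :
    ∀ q, PySem.Set.contains (PySem.Set.empty : PySem.Set Int) q = true → ∀ g : Nat,
      (phaseB numbers direction q 0 (g + 1)).isSome = true →
      (phaseB numbers direction p0 0 g).isSome = true := by
  intro q hq
  exact absurd ((PySem.Set.contains_iff _ _).mp hq) (by simp [PySem.Set.empty])

-- ===== VERDICT (by name: the statement is the Claim_ definition above) =====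
theorem evaluate_path_spec : Claim_equal_evaluate_path := by
  intro numbers _ hpre
  unfold Spec_evaluate_path
  obtain ⟨-, hterm⟩ := hpre
  set F := 2 * numbers.length + 3 with hF
  have hsome : (evalA numbers 0 0 1 0 F).isSome = true := by
    have := evalA_isSome numbers F 0 1 0 false
    simpa [cond] using this.trans hterm
  obtain ⟨r, hr⟩ := Option.isSome_iff_exists.mp hsome
  have hA : evaluate_path numbers = r := by
    unfold evaluate_path; rw [← hF, hr]; rfl
  rcases evalA_phase0 numbers 1 F 0 0 r hr with ⟨p, m, hp, hrpm⟩ | ⟨p, m, f', hf, hp, he⟩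
  · -- the walk ends on a zero cell inside the first phase
    have hfol := follow_eq_phase numbers 1 F 0 0 0 PySem.Set.empty (true, p, m)
      (by omega) hp (empty_inv numbers 1 0)
    obtain ⟨hp0, v, hvg, hv0⟩ := phaseB_out numbers 1 F 0 0 true p m hp (by omega)
    have hv0' : v = 0 := by simpa using hv0
    subst hv0'
    rw [hA, hrpm]
    simp only [evaluate_path_alt]
    rw [← hF, hfol]
    simp [hvg]
  · -- first phase bounces at p, the walk continues in the second direction
    have h1 := evalA_phase1 numbers f' p m (-1)
    rw [he] at h1
    cases h2 : phaseB numbers (-1) p m f' with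
    | none => rw [h2] at h1; exact absurd h1.symm (by simp)
    | some t =>
      rw [h2] at h1
      obtain ⟨b2, p2, m2⟩ := t
      have hrp : r = (p2, m2) := by simpa using h1
      have hmono := phaseB_mono numbers (-1) f' F p m (b2, p2, m2) h2 (by omega)
      obtain ⟨hp0, v, hvg, hvne⟩ := phaseB_out numbers 1 F 0 0 false p m hp (by omega)
      have hvne' : v ≠ 0 := by simpa using hvne
      have hfol1 := follow_eq_phase numbers 1 F 0 0 0 PySem.Set.empty (false, p, m)
        (by omega) hp (empty_inv numbers 1 0)
      have hfol2 := follow_eq_phase numbers (-1) F p m 0 PySem.Set.empty (b2, p2, m2)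
        hp0 hmono (empty_inv numbers (-1) p)
      rw [hA, hrp]
      simp only [evaluate_path_alt]
      rw [← hF, hfol1]
      simp only [hvg]
      rw [if_neg (by simpa using hvne')]
      rw [hfol2]
      simp only [Prod.mk.injEq]
      constructor
      · trivial
      · omega
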